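-- pv_equiv track=rewrite | github.com/uruhayato373/stats47 | scripts/generate-dashboard-seeds.py | generate_widgets
-- ===== SOURCE A (Python) =====
-- def generate_widgets(categories):
--     """全サブカテゴリのウィジェット定義を生成"""
--     sql = []
--     sql.append(
--         "-- ダッシュボードウィジェットシードデータ\n"
--         "-- 各ダッシュボードに3-5個のウィジェットを定義\n"
--         "-- 作成日: 2025-01-XX\n\n"
--     )
--
--     widget_id = 1
--     dashboard_id = 1
--
--     for category in categories:
--         for subcategory in category.get("subcategories", []):
--             subcategory_id = subcategory["id"]
--
--             # 各サブカテゴリに2つのダッシュボード（national, prefecture）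
--             for area_type in ["national", "prefecture"]:
--                 display_order = 1
--
--                 # メトリックカード × 3
--                 for i in range(3):
--                     metric_templates = [
--                         ("平均値", "totalAreaExcluding", "interpolateBlues"),
--                         ("最大値", "totalAreaExcluding", "interpolateGreens"),
--                         ("最小値", "totalAreaExcluding", "interpolateReds"),
--                     ]
--                     metric_key = metric_templates[i % len(metric_templates)][0]
--                     data_source_key = metric_templates[i % len(metric_templates)][1]
--
--                     sql.append(
--                         f"-- {subcategory['name']} ({area_type}) - メトリックカード {i+1}\n"
--                         f"INSERT INTO dashboard_widgets (\n"
--                         f"  id, dashboard_config_id, widget_type, widget_key, title,\n"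
--                         f"  config, data_source_type, data_source_key,\n"
--                         f"  grid_col_span, grid_row_span, display_order, is_visible\n"
--                         f") VALUES (\n"
--                         f"  {widget_id}, {dashboard_id}, 'metric',\n"
--                         f"  '{subcategory_id}-{area_type}-metric-{i+1}', '{metric_key}',\n"
--                         f"  '{{}}', 'ranking', '{data_source_key}',\n"
--                         f"  1, 1, {display_order}, 1\n"
--                         f");\n\n"
--                     )
--                     widget_id += 1
--                     display_order += 1
--
--                 # 折れ線グラフ
--                 sql.append(
--                     f"-- {subcategory['name']} ({area_type}) - 折れ線グラフ\n"
--                     f"INSERT INTO dashboard_widgets (\n"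
--                     f"  id, dashboard_config_id, widget_type, widget_key, title,\n"
--                     f"  config, data_source_type, data_source_key,\n"
--                     f"  grid_col_span, grid_row_span, display_order, is_visible\n"
--                     f") VALUES (\n"
--                     f"  {widget_id}, {dashboard_id}, 'line-chart',\n"
--                     f"  '{subcategory_id}-{area_type}-line-1', '推移グラフ',\n"
--                     f"  '{{'height': 300}}', 'ranking', 'totalAreaExcluding',\n"
--                     f"  2, 2, {display_order}, 1\n"
--                     f");\n\n"
--                 )
--                 widget_id += 1
--                 display_order += 1
--
--                 # 棒グラフ
--                 sql.append(
--                     f"-- {subcategory['name']} ({area_type}) - 棒グラフ\n"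
--                     f"INSERT INTO dashboard_widgets (\n"
--                     f"  id, dashboard_config_id, widget_type, widget_key, title,\n"
--                     f"  config, data_source_type, data_source_key,\n"
--                     f"  grid_col_span, grid_row_span, display_order, is_visible\n"
--                     f") VALUES (\n"
--                     f"  {widget_id}, {dashboard_id}, 'bar-chart',\n"
--                     f"  '{subcategory_id}-{area_type}-bar-1', '比較グラフ',\n"
--                     f"  '{{'height': 300}}', 'ranking', 'totalAreaExcluding',\n"
--                     f"  2, 2, {display_order}, 1\n"
--                     f");\n\n"
--                 )
--                 widget_id += 1
--                 display_order += 1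
--
--                 dashboard_id += 1
--
--     return "".join(sql)
-- ===== SOURCE B (Python) =====
-- HEADER = (
--     "-- ダッシュボードウィジェットシードデータ\n"
--     "-- 各ダッシュボードに3-5個のウィジェットを定義\n"
--     "-- 作成日: 2025-01-XX\n\n"
-- )
--
-- _TITLES = ["平均値", "最大値", "最小値"]
--
-- # one flat descriptor table: (comment tag, widget_type, key suffix, title, config, colspan, rowspan)
-- _WIDGETS = [
--     (f"メトリックカード {k+1}", "metric", f"metric-{k+1}", _TITLES[k], "'{}'", 1, 1)
--     for k in range(3)
-- ] + [
--     ("折れ線グラフ", "line-chart", "line-1", "推移グラフ", "'{'height': 300}'", 2, 2),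
--     ("棒グラフ", "bar-chart", "bar-1", "比較グラフ", "'{'height': 300}'", 2, 2),
-- ]
--
-- def _render(widget_id, dashboard_id, display_order, sub, area, tag, wtype, suffix, title, cfg, cs, rs):
--     return (
--         f"-- {sub['name']} ({area}) - {tag}\n"
--         f"INSERT INTO dashboard_widgets (\n"
--         f"  id, dashboard_config_id, widget_type, widget_key, title,\n"
--         f"  config, data_source_type, data_source_key,\n"
--         f"  grid_col_span, grid_row_span, display_order, is_visible\n"
--         f") VALUES (\n"
--         f"  {widget_id}, {dashboard_id}, '{wtype}',\n"
--         f"  '{sub['id']}-{area}-{suffix}', '{title}',\n"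
--         f"  {cfg}, 'ranking', 'totalAreaExcluding',\n"
--         f"  {cs}, {rs}, {display_order}, 1\n"
--         f");\n\n"
--     )
--
-- def generate_widgets(categories):
--     subs = [s for c in categories for s in c.get("subcategories", [])]
--     dashboards = [(s, a) for s in subs for a in ("national", "prefecture")]
--     parts = [HEADER] + [
--         _render(5 * d + k + 1, d + 1, k + 1, sub, area, *w)
--         for d, (sub, area) in enumerate(dashboards)
--         for k, w in enumerate(_WIDGETS)
--     ]
--     return "".join(parts)
-- ===== Notes on version B (the rewrite author's own statement) =====
-- stated objective: simpler
-- what changed: Replaces A's three inline SQL templates and three hand-stepped counters (widget_id/display_order increments, per-iteration template list re-built and indexed with i % 3) by one flat widget-descriptor table, closed-form ids (widget_id = 5*d+k+1, dashboard_id = d+1, display_order = k+1 over the flattened (subcategory, area) list) and a single shared render function.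
import Mathlib
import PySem

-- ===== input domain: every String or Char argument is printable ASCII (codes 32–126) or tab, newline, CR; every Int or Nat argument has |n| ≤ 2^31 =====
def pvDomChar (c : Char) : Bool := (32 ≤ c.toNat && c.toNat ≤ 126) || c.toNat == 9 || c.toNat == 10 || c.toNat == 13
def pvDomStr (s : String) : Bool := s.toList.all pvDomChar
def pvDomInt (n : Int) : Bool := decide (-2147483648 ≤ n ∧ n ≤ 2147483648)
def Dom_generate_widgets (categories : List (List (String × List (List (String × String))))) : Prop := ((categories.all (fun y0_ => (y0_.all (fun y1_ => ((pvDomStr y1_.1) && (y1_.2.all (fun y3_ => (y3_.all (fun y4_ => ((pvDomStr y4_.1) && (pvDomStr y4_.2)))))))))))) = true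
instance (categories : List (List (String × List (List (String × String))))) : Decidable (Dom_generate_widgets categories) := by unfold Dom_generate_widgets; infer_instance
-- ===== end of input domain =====

-- B restructures A's three inline SQL templates and three running counters into one flat widget-descriptor
-- table, closed-form ids (widget_id = 5*d+k+1, dashboard_id = d+1, display_order = k+1 over the flattened
-- (subcategory, area) list) and a single uniform render function; objective: simpler. Return values agree on
-- every input where the Python A returns (Pre_ excludes exactly the KeyError inputs, where B raises too).

-- ===== PORT A =====
def awHeader : String := "-- ダッシュボードウィジェットシードデータ\n-- 各ダッシュボードに3-5個のウィジェットを定義\n-- 作成日: 2025-01-XX\n\n"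

def aMetricTemplates : List (String × String × String) :=
  [("平均値", "totalAreaExcluding", "interpolateBlues"),
   ("最大値", "totalAreaExcluding", "interpolateGreens"),
   ("最小値", "totalAreaExcluding", "interpolateReds")]

-- one (sub, area) iteration of A's innermost block; subcategory["id"]/["name"] ported total with
-- getD "" (exact under Pre_, which excludes the KeyError inputs)
def aAreaLoop (subcategory : List (String × String)) (st : List String × Int × Int) (area : String) :
    List String × Int × Int :=
  let subcategoryId := (PySem.Dict.get? (PySem.Dict.mk subcategory) "id").getD ""
  let name := (PySem.Dict.get? (PySem.Dict.mk subcategory) "name").getD ""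
  let sql := st.1
  let widgetId := st.2.1
  let dashboardId := st.2.2
  let m := (PySem.List.pyRange 0 3 1).foldl (fun (acc : List String × Int × Int) i =>
      let t := (PySem.List.pyGet? aMetricTemplates (PySem.Int.mod i 3)).getD ("", "", "")
      let metricKey := t.1
      let dataSourceKey := t.2.1
      (acc.1 ++ ["-- " ++ name ++ " (" ++ area ++ ") - メトリックカード " ++ PySem.Int.toStr (i + 1) ++
        "\nINSERT INTO dashboard_widgets (\n  id, dashboard_config_id, widget_type, widget_key, title,\n  config, data_source_type, data_source_key,\n  grid_col_span, grid_row_span, display_order, is_visible\n) VALUES (\n  " ++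
        PySem.Int.toStr acc.2.1 ++ ", " ++ PySem.Int.toStr dashboardId ++ ", 'metric',\n  '" ++
        subcategoryId ++ "-" ++ area ++ "-metric-" ++ PySem.Int.toStr (i + 1) ++ "', '" ++ metricKey ++
        "',\n  '{}', 'ranking', '" ++ dataSourceKey ++ "',\n  1, 1, " ++ PySem.Int.toStr acc.2.2 ++
        ", 1\n);\n\n"], acc.2.1 + 1, acc.2.2 + 1))
    (sql, widgetId, (1 : Int))
  let sql1 := m.1
  let widgetId1 := m.2.1
  let displayOrder1 := m.2.2
  let sql2 := sql1 ++ ["-- " ++ name ++ " (" ++ area ++ ") - 折れ線グラフ\nINSERT INTO dashboard_widgets (\n  id, dashboard_config_id, widget_type, widget_key, title,\n  config, data_source_type, data_source_key,\n  grid_col_span, grid_row_span, display_order, is_visible\n) VALUES (\n  " ++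
      PySem.Int.toStr widgetId1 ++ ", " ++ PySem.Int.toStr dashboardId ++ ", 'line-chart',\n  '" ++
      subcategoryId ++ "-" ++ area ++ "-line-1', '推移グラフ',\n  '{'height': 300}', 'ranking', 'totalAreaExcluding',\n  2, 2, " ++
      PySem.Int.toStr displayOrder1 ++ ", 1\n);\n\n"]
  let sql3 := sql2 ++ ["-- " ++ name ++ " (" ++ area ++ ") - 棒グラフ\nINSERT INTO dashboard_widgets (\n  id, dashboard_config_id, widget_type, widget_key, title,\n  config, data_source_type, data_source_key,\n  grid_col_span, grid_row_span, display_order, is_visible\n) VALUES (\n  " ++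
      PySem.Int.toStr (widgetId1 + 1) ++ ", " ++ PySem.Int.toStr dashboardId ++ ", 'bar-chart',\n  '" ++
      subcategoryId ++ "-" ++ area ++ "-bar-1', '比較グラフ',\n  '{'height': 300}', 'ranking', 'totalAreaExcluding',\n  2, 2, " ++
      PySem.Int.toStr (displayOrder1 + 1) ++ ", 1\n);\n\n"]
  (sql3, widgetId1 + 2, dashboardId + 1)

def generate_widgets (categories : List (List (String × List (List (String × String))))) : String :=
  let sql : List String := [] ++ [awHeader]
  let st := categories.foldl (fun st category =>
      (PySem.Dict.getD (PySem.Dict.mk category) "subcategories" []).foldl (fun st subcategory =>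
        ["national", "prefecture"].foldl (fun st area => aAreaLoop subcategory st area) st) st)
    (sql, (1 : Int), (1 : Int))
  PySem.Str.join "" st.1

-- ===== PORT B =====
def bHeader : String := "-- ダッシュボードウィジェットシードデータ\n-- 各ダッシュボードに3-5個のウィジェットを定義\n-- 作成日: 2025-01-XX\n\n"

def bTitles : List String := ["平均値", "最大値", "最小値"]

-- flat descriptor table: (comment tag, widget_type, key suffix, title, config, colspan, rowspan)
def bWidgets : List (String × String × String × String × String × Int × Int) :=
  ((PySem.List.pyRange 0 3 1).map (fun k =>
      ("メトリックカード " ++ PySem.Int.toStr (k + 1), "metric", "metric-" ++ PySem.Int.toStr (k + 1),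
       (PySem.List.pyGet? bTitles k).getD "", "'{}'", (1 : Int), (1 : Int)))) ++
  [("折れ線グラフ", "line-chart", "line-1", "推移グラフ", "'{'height': 300}'", 2, 2),
   ("棒グラフ", "bar-chart", "bar-1", "比較グラフ", "'{'height': 300}'", 2, 2)]

def bRender (widgetId dashboardId displayOrder : Int) (sub : List (String × String))
    (area tag wtype suffix title cfg : String) (cs rs : Int) : String :=
  "-- " ++ (PySem.Dict.get? (PySem.Dict.mk sub) "name").getD "" ++ " (" ++ area ++ ") - " ++ tag ++
  "\nINSERT INTO dashboard_widgets (\n  id, dashboard_config_id, widget_type, widget_key, title,\n  config, data_source_type, data_source_key,\n  grid_col_span, grid_row_span, display_order, is_visible\n) VALUES (\n  " ++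
  PySem.Int.toStr widgetId ++ ", " ++ PySem.Int.toStr dashboardId ++ ", '" ++ wtype ++ "',\n  '" ++
  (PySem.Dict.get? (PySem.Dict.mk sub) "id").getD "" ++ "-" ++ area ++ "-" ++ suffix ++ "', '" ++ title ++ "',\n  " ++
  cfg ++ ", 'ranking', 'totalAreaExcluding',\n  " ++ PySem.Int.toStr cs ++ ", " ++ PySem.Int.toStr rs ++
  ", " ++ PySem.Int.toStr displayOrder ++ ", 1\n);\n\n"

def generate_widgets_alt (categories : List (List (String × List (List (String × String))))) : String :=
  let subs := categories.flatMap (fun c => PySem.Dict.getD (PySem.Dict.mk c) "subcategories" [])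
  let dashboards := subs.flatMap (fun s => [(s, "national"), (s, "prefecture")])
  let parts := [bHeader] ++ (PySem.List.enumerate dashboards 0).flatMap (fun p =>
      (PySem.List.enumerate bWidgets 0).map (fun q =>
        bRender (5 * p.1 + q.1 + 1) (p.1 + 1) (q.1 + 1) p.2.1 p.2.2
          q.2.1 q.2.2.1 q.2.2.2.1 q.2.2.2.2.1 q.2.2.2.2.2.1 q.2.2.2.2.2.2.1 q.2.2.2.2.2.2.2))
  PySem.Str.join "" parts

-- ===== PRECONDITION & SPEC =====
-- Pre_ excludes exactly the inputs where the Python A raises KeyError: a subcategory dict reached by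
-- the loops that lacks an "id" or a "name" key.
def Pre_generate_widgets (categories : List (List (String × List (List (String × String))))) : Prop :=
  (categories.all (fun c =>
    (PySem.Dict.getD (PySem.Dict.mk c) "subcategories" ([] : List (List (String × String)))).all (fun s =>
      (PySem.Dict.get? (PySem.Dict.mk s) "id").isSome && (PySem.Dict.get? (PySem.Dict.mk s) "name").isSome))) = true
instance (categories : List (List (String × List (List (String × String))))) : Decidable (Pre_generate_widgets categories) := by unfold Pre_generate_widgets; infer_instance

def pvWitness_generate_widgets : (List (List (String × List (List (String × String))))) :=
  [[("subcategories", [[("id", "a01"), ("name", "Area")]])]]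

def Spec_generate_widgets (categories : List (List (String × List (List (String × String))))) (out : String) : Prop := out = generate_widgets_alt categories
instance (categories : List (List (String × List (List (String × String))))) (out : String) : Decidable (Spec_generate_widgets categories out) := by unfold Spec_generate_widgets; infer_instance

-- ===== CLAIM (what is proved, stated in full; the proofs are below) =====
def Claim_equal_generate_widgets : Prop := ∀ (categories : List (List (String × List (List (String × String))))), Dom_generate_widgets categories → Pre_generate_widgets categories → Spec_generate_widgets categories (generate_widgets categories)

-- ===== LEMMAS AND PROOFS =====

-- one step of A's (subcategory, area) iteration, as a function of the flattened pair
def stepA (st : List String × Int × Int) (p : List (String × String) × String) :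
    List String × Int × Int := aAreaLoop p.1 st p.2

-- the five strings B emits for the dashboard with widget ids w..w+4 and dashboard id dd
def bPairW (w dd : Int) (sub : List (String × String)) (area : String) : List String :=
  [bRender w dd 1 sub area "メトリックカード 1" "metric" "metric-1" "平均値" "'{}'" 1 1,
   bRender (w+1) dd 2 sub area "メトリックカード 2" "metric" "metric-2" "最大値" "'{}'" 1 1,
   bRender (w+2) dd 3 sub area "メトリックカード 3" "metric" "metric-3" "最小値" "'{}'" 1 1,
   bRender (w+3) dd 4 sub area "折れ線グラフ" "line-chart" "line-1" "推移グラフ" "'{'height': 300}'" 2 2,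
   bRender (w+4) dd 5 sub area "棒グラフ" "bar-chart" "bar-1" "比較グラフ" "'{'height': 300}'" 2 2]

-- all strings emitted for the pair list ps when the first pair has 0-based dashboard index j
def renderAll (ps : List (List (String × String) × String)) (j : Int) : List String :=
  match ps with
  | [] => []
  | p :: ps => bPairW (5*j+1) (j+1) p.1 p.2 ++ renderAll ps (j+1)

set_option maxRecDepth 4000

-- literal-splitting facts (each closed, by rfl) aligning A's f-string segmentation with B's
theorem toStr_one : PySem.Int.toStr 1 = "1" := rfl
theorem toStr_two : PySem.Int.toStr 2 = "2" := rfl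
theorem toStr_three : PySem.Int.toStr 3 = "3" := rfl
theorem sA1 : (") - メトリックカード " : String) = ") - " ++ "メトリックカード " := rfl
theorem sB1 : ("メトリックカード 1" : String) = "メトリックカード " ++ "1" := rfl
theorem sB2 : ("メトリックカード 2" : String) = "メトリックカード " ++ "2" := rfl
theorem sB3 : ("メトリックカード 3" : String) = "メトリックカード " ++ "3" := rfl
theorem sA2 : (", 'metric',
  '" : String) = ", '" ++ "metric" ++ "',
  '" := rfl
theorem sA3 : ("-metric-" : String) = "-" ++ "metric-" := rfl
theorem sM1 : ("metric-1" : String) = "metric-" ++ "1" := rfl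
theorem sM2 : ("metric-2" : String) = "metric-" ++ "2" := rfl
theorem sM3 : ("metric-3" : String) = "metric-" ++ "3" := rfl
theorem sA4 : ("',
  '{}', 'ranking', '" : String) = "',
  " ++ "'{}'" ++ ", 'ranking', '" := rfl
theorem sB4 : (", 'ranking', 'totalAreaExcluding',
  " : String) = ", 'ranking', '" ++ "totalAreaExcluding" ++ "',
  " := rfl
theorem sA5 : ("',
  1, 1, " : String) = "',
  " ++ "1" ++ ", " ++ "1" ++ ", " := rfl
theorem lA1 : (") - 折れ線グラフ
INSERT INTO dashboard_widgets (
  id, dashboard_config_id, widget_type, widget_key, title,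
  config, data_source_type, data_source_key,
  grid_col_span, grid_row_span, display_order, is_visible
) VALUES (
  " : String) = ") - " ++ "折れ線グラフ" ++ "
INSERT INTO dashboard_widgets (
  id, dashboard_config_id, widget_type, widget_key, title,
  config, data_source_type, data_source_key,
  grid_col_span, grid_row_span, display_order, is_visible
) VALUES (
  " := rfl
theorem lA2 : (", 'line-chart',
  '" : String) = ", '" ++ "line-chart" ++ "',
  '" := rfl
theorem lA3 : ("-line-1', '推移グラフ',
  '{'height': 300}', 'ranking', 'totalAreaExcluding',
  2, 2, " : String) = "-" ++ "line-1" ++ "', '" ++ "推移グラフ" ++ "',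
  " ++ "'{'height': 300}'" ++ ", 'ranking', '" ++ "totalAreaExcluding" ++ "',
  " ++ "2" ++ ", " ++ "2" ++ ", " := rfl
theorem bA1 : (") - 棒グラフ
INSERT INTO dashboard_widgets (
  id, dashboard_config_id, widget_type, widget_key, title,
  config, data_source_type, data_source_key,
  grid_col_span, grid_row_span, display_order, is_visible
) VALUES (
  " : String) = ") - " ++ "棒グラフ" ++ "
INSERT INTO dashboard_widgets (
  id, dashboard_config_id, widget_type, widget_key, title,
  config, data_source_type, data_source_key,
  grid_col_span, grid_row_span, display_order, is_visible
) VALUES (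
  " := rfl
theorem bA2 : (", 'bar-chart',
  '" : String) = ", '" ++ "bar-chart" ++ "',
  '" := rfl
theorem bA3 : ("-bar-1', '比較グラフ',
  '{'height': 300}', 'ranking', 'totalAreaExcluding',
  2, 2, " : String) = "-" ++ "bar-1" ++ "', '" ++ "比較グラフ" ++ "',
  " ++ "'{'height': 300}'" ++ ", 'ranking', '" ++ "totalAreaExcluding" ++ "',
  " ++ "2" ++ ", " ++ "2" ++ ", " := rfl

-- A's whole (subcategory, area) block emits exactly B's five strings and advances the counters by 5 and 1
theorem pair_step (sub : List (String × String)) (sql : List String) (w dd : Int) (area : String) :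
    aAreaLoop sub (sql, w, dd) area = (sql ++ bPairW w dd sub area, w + 5, dd + 1) := by
  have hr : PySem.List.pyRange 0 3 1 = [0, 1, 2] := by decide
  have h0 : (PySem.List.pyGet? aMetricTemplates (PySem.Int.mod 0 3)).getD ("", "", "") = ("平均値", "totalAreaExcluding", "interpolateBlues") := by decide
  have h1 : (PySem.List.pyGet? aMetricTemplates (PySem.Int.mod 1 3)).getD ("", "", "") = ("最大値", "totalAreaExcluding", "interpolateGreens") := by decide
  have h2 : (PySem.List.pyGet? aMetricTemplates (PySem.Int.mod 2 3)).getD ("", "", "") = ("最小値", "totalAreaExcluding", "interpolateReds") := by decide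
  simp only [aAreaLoop, bPairW, bRender, hr, List.foldl_cons, List.foldl_nil, h0, h1, h2]
  norm_num
  simp only [toStr_one, toStr_two, toStr_three,
    sA1, sB1, sB2, sB3, sA2, sA3, sM1, sM2, sM3, sA4, sB4, sA5, lA1, lA2, lA3, bA1, bA2, bA3,
    String.append_assoc]
  ring_nf
  simp

-- B's inner map over the enumerated descriptor table is bPairW
theorem inner_map (j : Int) (sub : List (String × String)) (area : String) :
    (PySem.List.enumerate bWidgets 0).map (fun q =>
        bRender (5 * j + q.1 + 1) (j + 1) (q.1 + 1) sub area
          q.2.1 q.2.2.1 q.2.2.2.1 q.2.2.2.2.1 q.2.2.2.2.2.1 q.2.2.2.2.2.2.1 q.2.2.2.2.2.2.2) =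
      bPairW (5 * j + 1) (j + 1) sub area := by
  have he : PySem.List.enumerate bWidgets 0 =
      [(0, "メトリックカード 1", "metric", "metric-1", "平均値", "'{}'", 1, 1),
       (1, "メトリックカード 2", "metric", "metric-2", "最大値", "'{}'", 1, 1),
       (2, "メトリックカード 3", "metric", "metric-3", "最小値", "'{}'", 1, 1),
       (3, "折れ線グラフ", "line-chart", "line-1", "推移グラフ", "'{'height': 300}'", 2, 2),
       (4, "棒グラフ", "bar-chart", "bar-1", "比較グラフ", "'{'height': 300}'", 2, 2)] := rfl
  simp only [he, List.map_cons, List.map_nil, bPairW]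
  norm_num
  ring_nf
  simp

-- B's enumerate-and-flatMap over the pair list is renderAll
theorem b_flatMap (ps : List (List (String × String) × String)) (j : Int) :
    (PySem.List.enumerate ps j).flatMap (fun p =>
        (PySem.List.enumerate bWidgets 0).map (fun q =>
          bRender (5 * p.1 + q.1 + 1) (p.1 + 1) (q.1 + 1) p.2.1 p.2.2
            q.2.1 q.2.2.1 q.2.2.2.1 q.2.2.2.2.1 q.2.2.2.2.2.1 q.2.2.2.2.2.2.1 q.2.2.2.2.2.2.2)) =
      renderAll ps j := by
  have key : ∀ (qs : List (List (String × String) × String)) (j : Int),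
      (PySem.List.enumerate qs j).flatMap (fun p => bPairW (5 * p.1 + 1) (p.1 + 1) p.2.1 p.2.2) =
        renderAll qs j := by
    intro qs
    induction qs with
    | nil => intro j; simp [PySem.List.enumerate_nil, renderAll]
    | cons p ps ih => intro j; simp [PySem.List.enumerate_cons, List.flatMap_cons, renderAll, ih]
  simp only [inner_map]
  exact key ps j

-- A's fold over the flattened pair list, with counters in closed form
theorem a_loop (ps : List (List (String × String) × String)) (sql : List String) (j : Int) :
    ps.foldl stepA (sql, 5 * j + 1, j + 1) =
      (sql ++ renderAll ps j, 5 * (j + ps.length) + 1, (j + ps.length) + 1) := by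
  induction ps generalizing sql j with
  | nil => simp [renderAll]
  | cons p ps ih =>
    simp only [List.foldl_cons, stepA, renderAll]
    rw [pair_step]
    have h5 : (5 * j + 1) + 5 = 5 * (j + 1) + 1 := by ring
    have h1 : (j + 1) + 1 = (j + 1) + 1 := rfl
    rw [h5]
    rw [ih (sql ++ bPairW (5 * j + 1) (j + 1) p.1 p.2) (j + 1)]
    refine Prod.ext ?_ (Prod.ext ?_ ?_) <;> simp [List.append_assoc] <;> ring

-- A's nested category/subcategory/area folds are the fold of stepA over the flattened pairs
theorem a_flatten (categories : List (List (String × List (List (String × String))))) (st : List String × Int × Int) :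
    categories.foldl (fun st category =>
        (PySem.Dict.getD (PySem.Dict.mk category) "subcategories" []).foldl (fun st subcategory =>
          ["national", "prefecture"].foldl (fun st area => aAreaLoop subcategory st area) st) st) st =
      ((categories.flatMap (fun c => PySem.Dict.getD (PySem.Dict.mk c) "subcategories" [])).flatMap
          (fun s => [(s, "national"), (s, "prefecture")])).foldl stepA st := by
  simp only [List.foldl_flatMap, List.foldl_cons, List.foldl_nil, stepA]

-- ===== VERDICT (by name: the statement is the Claim_ definition above) =====
theorem generate_widgets_spec : Claim_equal_generate_widgets := by
  intro categories _ _
  show generate_widgets categories = generate_widgets_alt categories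
  simp only [generate_widgets, generate_widgets_alt, List.nil_append]
  rw [a_flatten]
  have hA := a_loop (((categories.flatMap (fun c => PySem.Dict.getD (PySem.Dict.mk c) "subcategories" [])).flatMap
      (fun s => [(s, "national"), (s, "prefecture")]))) [awHeader] 0
  norm_num at hA
  rw [hA, b_flatMap]
  rfl
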